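-- pv_equiv track=rewrite | github.com/rajeevshrestha1/passwordstrengthanalyser | cw3.py | get_charset_info
-- ===== SOURCE A (Python) =====
-- import string
--
-- def get_charset_info(password):
--     charset_size = 0
--     types = []
--     if any(c.islower() for c in password):
--         charset_size += 26
--         types.append("lowercase")
--     if any(c.isupper() for c in password):
--         charset_size += 26
--         types.append("uppercase")
--     if any(c.isdigit() for c in password):
--         charset_size += 10
--         types.append("digits")
--     if any(c in string.punctuation for c in password):
--         charset_size += 32
--         types.append("special")
--     return charset_size, types
-- ===== SOURCE B (Python) =====
-- import string
--
-- def get_charset_info(password):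
--     def classify(c):
--         if c.islower():
--             return 0
--         if c.isupper():
--             return 1
--         if c.isdigit():
--             return 2
--         if c in string.punctuation:
--             return 3
--         return None
--
--     seen = set()
--     for c in password:
--         k = classify(c)
--         if k is not None:
--             seen.add(k)
--     table = [(0, 26, "lowercase"), (1, 26, "uppercase"), (2, 10, "digits"), (3, 32, "special")]
--     charset_size = sum(s for k, s, _ in table if k in seen)
--     types = [t for k, _, t in table if k in seen]
--     return charset_size, types
-- ===== Notes on version B (the rewrite author's own statement) =====
-- stated objective: faster
-- what changed: classifies each character into a class index in one pass collecting a set of present classes, then derives both the size sum and the types list from a single data table filtered by set membership, instead of A's four separate any() generator scans each guarding its own += and append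
import Mathlib
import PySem

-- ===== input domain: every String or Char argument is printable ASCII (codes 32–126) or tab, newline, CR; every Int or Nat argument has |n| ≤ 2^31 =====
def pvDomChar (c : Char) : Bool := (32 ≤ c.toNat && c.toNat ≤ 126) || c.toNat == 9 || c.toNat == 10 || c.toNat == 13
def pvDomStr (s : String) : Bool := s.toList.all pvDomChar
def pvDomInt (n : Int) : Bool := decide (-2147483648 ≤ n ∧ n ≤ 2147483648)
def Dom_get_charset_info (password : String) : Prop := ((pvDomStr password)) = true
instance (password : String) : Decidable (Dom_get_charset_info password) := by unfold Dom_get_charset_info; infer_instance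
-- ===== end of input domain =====

-- B replaces A's four separate any() scans with one classification pass that
-- collects a set of present class indices, then reads size and types off a table.


-- string.punctuation
def pvPunct : List Char := ['!','"','#','$','%','&','\'','(',')','*','+',',','-','.','/',':',';','<','=','>','?','@','[','\\',']','^','_','`','{','|','}','~']

-- ===== PORT A =====
def get_charset_info (password : String) : Int × List String :=
  let cs := password.toList
  let charset_size : Int := 0
  let types : List String := []
  let (charset_size, types) :=
    if cs.any PySem.Chars.islower then (charset_size + 26, types ++ ["lowercase"]) else (charset_size, types)
  let (charset_size, types) :=
    if cs.any PySem.Chars.isupper then (charset_size + 26, types ++ ["uppercase"]) else (charset_size, types)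
  let (charset_size, types) :=
    if cs.any PySem.Chars.isdigit then (charset_size + 10, types ++ ["digits"]) else (charset_size, types)
  let (charset_size, types) :=
    if cs.any (fun c => pvPunct.contains c) then (charset_size + 32, types ++ ["special"]) else (charset_size, types)
  (charset_size, types)

-- ===== PORT B =====
-- Source B's classify(c): class index of c, none when c is in no class
def pvClassify (c : Char) : Option Nat :=
  if PySem.Chars.islower c then some 0
  else if PySem.Chars.isupper c then some 1
  else if PySem.Chars.isdigit c then some 2
  else if pvPunct.contains c then some 3
  else none

-- Source B's fixed data table
def pvTable : List (Nat × Int × String) :=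
  [(0, 26, "lowercase"), (1, 26, "uppercase"), (2, 10, "digits"), (3, 32, "special")]

def get_charset_info_alt (password : String) : Int × List String :=
  let seen : PySem.Set Nat :=
    password.toList.foldl
      (fun s c => match pvClassify c with | some k => PySem.Set.add s k | none => s)
      PySem.Set.empty
  let charset_size : Int :=
    (pvTable.filter (fun e => PySem.Set.contains seen e.1)).foldl (fun a e => a + e.2.1) 0
  let types : List String :=
    (pvTable.filter (fun e => PySem.Set.contains seen e.1)).map (fun e => e.2.2)
  (charset_size, types)

-- ===== PRECONDITION & SPEC =====
def Spec_get_charset_info (password : String) (out : Int × List String) : Prop := out = get_charset_info_alt password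
instance (password : String) (out : Int × List String) : Decidable (Spec_get_charset_info password out) := by unfold Spec_get_charset_info; infer_instance

-- ===== CLAIM =====
def Claim_equal_get_charset_info : Prop := ∀ (password : String), Dom_get_charset_info password → Spec_get_charset_info password (get_charset_info password)

-- ===== LEMMAS AND PROOFS =====

-- membership in the set built by B's classification pass
lemma mem_seen (cs : List Char) (s : PySem.Set Nat) (k : Nat) :
    (k ∈ cs.foldl (fun s c => match pvClassify c with | some k => PySem.Set.add s k | none => s) s)
      ↔ k ∈ s ∨ ∃ c ∈ cs, pvClassify c = some k := by
  induction cs generalizing s with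
  | nil => simp
  | cons c rest ih =>
    simp only [List.foldl_cons, ih, List.mem_cons]
    cases h : pvClassify c with
    | none =>
      constructor
      · rintro (hs | hx); · exact Or.inl hs
        · exact Or.inr ⟨hx.choose, Or.inr hx.choose_spec.1, hx.choose_spec.2⟩
      · rintro (hs | ⟨d, (rfl | hd), hcd⟩)
        · exact Or.inl hs
        · rw [h] at hcd; cases hcd
        · exact Or.inr ⟨d, hd, hcd⟩
    | some m =>
      rw [PySem.Set.mem_add]
      constructor
      · rintro ((hs | rfl) | hx)
        · exact Or.inl hs
        · exact Or.inr ⟨c, Or.inl rfl, h⟩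
        · exact Or.inr ⟨hx.choose, Or.inr hx.choose_spec.1, hx.choose_spec.2⟩
      · rintro (hs | ⟨d, (rfl | hd), hcd⟩)
        · exact Or.inl (Or.inl hs)
        · rw [h] at hcd; exact Or.inl (Or.inr (Option.some_inj.mp hcd).symm)
        · exact Or.inr ⟨d, hd, hcd⟩

lemma classify_eq_zero (c : Char) : pvClassify c = some 0 ↔ PySem.Chars.islower c = true := by
  unfold pvClassify; split_ifs <;> simp_all

lemma classify_eq_one (c : Char) : pvClassify c = some 1 ↔ PySem.Chars.isupper c = true := by
  unfold pvClassify
  split_ifs with h1 <;> simp_all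
  simp [PySem.Chars.islower, PySem.Chars.isupper, Char.le_def, UInt32.le_iff_toNat_le] at *; omega

lemma classify_eq_two (c : Char) : pvClassify c = some 2 ↔ PySem.Chars.isdigit c = true := by
  unfold pvClassify
  split_ifs with h1 h2 <;> simp_all <;>
    simp [PySem.Chars.islower, PySem.Chars.isupper, PySem.Chars.isdigit, Char.le_def,
      UInt32.le_iff_toNat_le] at * <;> omega

lemma classify_eq_three (c : Char) : pvClassify c = some 3 ↔ pvPunct.contains c = true := by
  unfold pvClassify
  split_ifs with h1 h2 h3 <;> simp_all <;>
  · intro hm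
    simp only [pvPunct, List.mem_cons, List.not_mem_nil, or_false] at hm
    simp [PySem.Chars.islower, PySem.Chars.isupper, PySem.Chars.isdigit, Char.le_def,
      UInt32.le_iff_toNat_le] at *
    rcases hm with rfl|rfl|rfl|rfl|rfl|rfl|rfl|rfl|rfl|rfl|rfl|rfl|rfl|rfl|rfl|rfl|rfl|rfl|rfl|rfl|rfl|rfl|rfl|rfl|rfl|rfl|rfl|rfl|rfl|rfl|rfl|rfl <;> simp_all

-- contains on B's seen set, phrased as the four any-scans of A
lemma seen_contains (cs : List Char) (k : Nat) (p : Char → Bool)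
    (hp : ∀ c, pvClassify c = some k ↔ p c = true) :
    PySem.Set.contains
      (cs.foldl (fun s c => match pvClassify c with | some k => PySem.Set.add s k | none => s)
        PySem.Set.empty) k = cs.any p := by
  rw [Bool.eq_iff_iff]
  rw [PySem.Set.contains_iff, mem_seen]
  simp only [PySem.Set.empty, List.not_mem_nil, false_or, List.any_eq_true]
  exact ⟨fun ⟨c, hc, h⟩ => ⟨c, hc, (hp c).mp h⟩, fun ⟨c, hc, h⟩ => ⟨c, hc, (hp c).mpr h⟩⟩

-- ===== VERDICT =====
theorem get_charset_info_spec : Claim_equal_get_charset_info := by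
  intro password _
  have h0 := seen_contains password.toList 0 _ classify_eq_zero
  have h1 := seen_contains password.toList 1 _ classify_eq_one
  have h2 := seen_contains password.toList 2 _ classify_eq_two
  have h3 := seen_contains password.toList 3 _ classify_eq_three
  unfold Spec_get_charset_info get_charset_info get_charset_info_alt
  simp only [pvTable, List.filter_cons, List.filter_nil, h0, h1, h2, h3]
  cases password.toList.any PySem.Chars.islower <;>
  cases password.toList.any PySem.Chars.isupper <;>
  cases password.toList.any PySem.Chars.isdigit <;>
  cases password.toList.any (fun c => pvPunct.contains c) <;> simp
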